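-- pv_equiv track=rewrite | github.com/qianOU/leetcode | (---again)LCP 41. 黑白翻转棋.py | flipChess
-- ===== SOURCE A (Python) =====
-- def flipChess(chessboard) -> int:
--     m, n = len(chessboard), len(chessboard[0])
--     d = [(0, 1), (0, -1), (1, 0), (-1, 0),
--         (-1, -1), (-1, 1), (1, -1), (1, 1)]
--
--     chessboard2 = chessboard
--     chessboard = list(map(list, chessboard2))
--     check = lambda x, y: 0 <= x < m and 0 <= y < n
--
--     def search(x, y, d_i, d_j): # 判断x，y 沿着 d_i, d_j 方向是否是一条拓展路径，如果是将路径上的白棋翻转为黑色，其后返回路径上的所有棋子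
--         if not check(x, y) or chessboard[x][y] == '.':
--             return False, []
--         if chessboard[x][y] == 'X':
--             return True, []
--         chessboard[x][y] = 'X'
--         flag, tmp = search(x + d_i, y + d_j, d_i, d_j)
--         if not flag:
--             chessboard[x][y] = 'O'
--             return False, []
--         return flag, [(x, y)] + tmp
--
--     def dfs(x, y):
--         count = 0
--         for i, j in d:
--             x1, y1 = x + i, y + j
--             flag, tmp = search(x1, y1, i, j)
--             while tmp:
--                 count += 1 + dfs(*tmp.pop())
--         return count
--
--     ans = 0
--     for i in range(m):
--         for j in range(n):
--             if chessboard[i][j] == '.':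
--                 ans = max(ans, dfs(i, j))
--                 chessboard = list(map(list, chessboard2)) # 更新棋盘
--     return ans
-- ===== SOURCE B (Python) =====
-- def flipChess(chessboard) -> int:
--     m, n = len(chessboard), len(chessboard[0])
--     dirs = [(0, 1), (0, -1), (1, 0), (-1, 0),
--             (-1, -1), (-1, 1), (1, -1), (1, 1)]
--
--     def cascade(si, sj):
--         # iterative DFS cascade with an explicit frame stack; scans are two-phase
--         # (collect the chain first, flip it only if it ends on an 'X')
--         board = [list(row) for row in chessboard]
--         count = 0
--         stack = [[(si, sj), 0, []]]   # frame = [cell, next-direction index, pending flipped cells]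
--         while stack:
--             frame = stack[-1]
--             (x, y), di_idx, tmp = frame
--             if tmp:
--                 p = tmp.pop()
--                 count += 1
--                 stack.append([p, 0, []])
--             elif di_idx < 8:
--                 frame[1] += 1
--                 di, dj = dirs[di_idx]
--                 cx, cy, chain = x + di, y + dj, []
--                 while 0 <= cx < m and 0 <= cy < n and board[cx][cy] != '.':
--                     if board[cx][cy] == 'X':
--                         for (fx, fy) in chain:
--                             board[fx][fy] = 'X'
--                         frame[2] = chain
--                         break
--                     chain.append((cx, cy))
--                     cx += di
--                     cy += dj
--             else:
--                 stack.pop()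
--         return count
--
--     ans = 0
--     for i in range(m):
--         for j in range(n):
--             if chessboard[i][j] == '.':
--                 ans = max(ans, cascade(i, j))
--     return ans
-- ===== Notes on version B (the rewrite author's own statement) =====
-- stated objective: alternative
-- what changed: A's recursive backtracking search (flip while walking, un-flip on failure) and doubly-recursive dfs cascade are replaced by an explicit frame-stack machine whose direction scans collect the chain first and flip it only when it ends on an 'X'.
import Mathlib
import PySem

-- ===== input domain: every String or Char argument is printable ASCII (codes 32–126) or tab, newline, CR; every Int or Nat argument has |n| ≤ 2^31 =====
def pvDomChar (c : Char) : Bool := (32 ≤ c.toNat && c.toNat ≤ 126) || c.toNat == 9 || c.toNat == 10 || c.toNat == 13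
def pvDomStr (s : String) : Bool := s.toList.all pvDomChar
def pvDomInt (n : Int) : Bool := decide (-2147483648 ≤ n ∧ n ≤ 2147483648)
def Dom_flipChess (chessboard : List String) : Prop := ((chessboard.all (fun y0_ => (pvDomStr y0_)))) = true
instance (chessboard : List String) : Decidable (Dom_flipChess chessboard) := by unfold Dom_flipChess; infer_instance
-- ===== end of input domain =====

-- B replaces A's recursive backtracking DFS cascade by an explicit-stack machine whose
-- direction scans collect the chain first and flip it only on success (objective: alternative).

-- ===== PORT A =====
def pvDirs : List (Int × Int) := [(0,1),(0,-1),(1,0),(-1,0),(-1,-1),(-1,1),(1,-1),(1,1)]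

def pvGet (b : List (List Char)) (x y : Int) : Char := (b.getD x.toNat []).getD y.toNat '.'

def pvSetC (b : List (List Char)) (x y : Int) (c : Char) : List (List Char) :=
  b.set x.toNat ((b.getD x.toNat []).set y.toNat c)

def pvCheck (m n x y : Int) : Bool :=
  decide (0 ≤ x) && decide (x < m) && decide (0 ≤ y) && decide (y < n)

-- A's `search`: flips as it walks, un-flips (to 'O') while backtracking on failure.
-- Fuel m+n+2 is passed by the caller; the walk leaves the board within that many steps.
def searchA (m n : Int) : Nat → Int → Int → Int → Int → List (List Char) →
    Bool × List (Int × Int) × List (List Char)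
  | 0, _, _, _, _, b => (false, [], b)
  | fuel+1, x, y, di, dj, b =>
    if ¬ (pvCheck m n x y = true) ∨ pvGet b x y = '.' then (false, [], b)
    else if pvGet b x y = 'X' then (true, [], b)
    else
      let r := searchA m n fuel (x+di) (y+dj) di dj (pvSetC b x y 'X')
      if r.1 = false then (false, [], pvSetC r.2.2 x y 'O')
      else (true, (x,y) :: r.2.1, r.2.2)

-- A's `dfs`: loop over the 8 directions (dirsA), inner while-loop popping the chain
-- from the back (popA, fuel = the list's length).  The dfs recursion fuel (never
-- exhausted: the caller passes m*n+2 and nesting depth is bounded by #flips + 1)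
-- drops by one per nested dfs call.
def popA (dfs : (Int × Int) → List (List Char) → Int × List (List Char)) :
    Nat → List (Int × Int) → List (List Char) → Int × List (List Char)
  | _, [], b => (0, b)
  | 0, _ :: _, b => (0, b)
  | fl+1, t :: ts, b =>
    let pr := (t :: ts).getLast (by simp)
    let r := dfs pr b
    let s := popA dfs fl ((t :: ts).dropLast) r.2
    (1 + r.1 + s.1, s.2)

def dirsA (m n : Int) (K : Nat)
    (dfs : (Int × Int) → List (List Char) → Int × List (List Char)) (x y : Int) :
    List (Int × Int) → List (List Char) → Int × List (List Char)
  | [], b => (0, b)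
  | (di, dj) :: rest, b =>
    let r := searchA m n K (x+di) (y+dj) di dj b
    let p := popA dfs r.2.1.length r.2.1 r.2.2
    let q := dirsA m n K dfs x y rest p.2
    (p.1 + q.1, q.2)

def dfsA (m n : Int) (K : Nat) : Nat → Int → Int → List (List Char) → Int × List (List Char)
  | 0, _, _, b => (0, b)
  | φ+1, x, y, b => dirsA m n K (fun p b' => dfsA m n K φ p.1 p.2 b') x y pvDirs b

def flipChess (chessboard : List String) : Int :=
  let rows := chessboard.map (fun s => s.toList)
  let m : Int := rows.length
  let n : Int := (rows.headD []).length
  let K : Nat := rows.length + (rows.headD []).length + 2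
  let DF : Nat := rows.length * (rows.headD []).length + 2
  ((PySem.List.pyRange 0 m 1).foldl (fun s i =>
     (PySem.List.pyRange 0 n 1).foldl (fun s' j =>
        if pvGet s'.2 i j = '.' then
          (max s'.1 (dfsA m n K DF i j s'.2).1, rows)
        else s') s) ((0:Int), rows)).1

-- ===== PORT B =====
-- B's scan: walk outward collecting the chain (no mutation), tail-recursively.
def scanGoB (m n : Int) : Nat → Int → Int → Int → Int → List (List Char) →
    List (Int × Int) → List (Int × Int)
  | 0, _, _, _, _, _, _ => []
  | f+1, cx, cy, di, dj, b, acc =>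
    if ¬ (pvCheck m n cx cy = true) ∨ pvGet b cx cy = '.' then []
    else if pvGet b cx cy = 'X' then acc.reverse
    else scanGoB m n f (cx+di) (cy+dj) di dj b ((cx,cy) :: acc)

def flipAllB (ch : List (Int × Int)) (b : List (List Char)) : List (List Char) :=
  ch.foldl (fun bb p => pvSetC bb p.1 p.2 'X') b

-- termination weight for the machine's gas (the run can take at most pvW K f
-- steps from a fresh frame of fuel f; proved in machineB_den below)
def pvW (K : Nat) : Nat → Nat
  | 0 => 1
  | f+1 => 1 + 8 * (1 + K * (1 + pvW K f))

-- B's cascade: explicit stack of frames (fuel, cell, remaining directions, pending chain),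
-- run on a gas counter that the caller makes large enough for the whole cascade.
def machineB (m n : Int) (K : Nat) :
    Nat → Int × List (List Char) →
    List (Nat × (Int × Int) × List (Int × Int) × List (Int × Int)) →
    Int × List (List Char)
  | 0, s, _ => s
  | _+1, s, [] => s
  | gas+1, s, (0, _, _, _) :: rest => machineB m n K gas s rest
  | gas+1, s, (f+1, pos, ds, t :: ts) :: rest =>
    let p := (t :: ts).getLast (by simp)
    machineB m n K gas (s.1 + 1, s.2)
      ((f, p, pvDirs, []) :: (f+1, pos, ds, (t :: ts).dropLast) :: rest)
  | gas+1, s, (_+1, _, [], []) :: rest => machineB m n K gas s rest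
  | gas+1, s, (f+1, pos, (di,dj) :: ds', []) :: rest =>
    let ch := scanGoB m n K (pos.1 + di) (pos.2 + dj) di dj s.2 []
    machineB m n K gas (s.1, flipAllB ch s.2) ((f+1, pos, ds', ch) :: rest)

def flipChess_alt (chessboard : List String) : Int :=
  let rows := chessboard.map (fun s => s.toList)
  let m : Int := rows.length
  let n : Int := (rows.headD []).length
  let K : Nat := rows.length + (rows.headD []).length + 2
  let DF : Nat := rows.length * (rows.headD []).length + 2
  (PySem.List.pyRange 0 m 1).foldl (fun ans i =>
    (PySem.List.pyRange 0 n 1).foldl (fun ans' j =>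
      if pvGet rows i j = '.' then
        max ans' (machineB m n K (pvW K DF + 1) (0, rows) [(DF, (i,j), pvDirs, [])]).1
      else ans') ans) 0

-- ===== PRECONDITION & SPEC =====
-- Pre_ excludes exactly the inputs where Python A raises IndexError: the empty board
-- (len(chessboard[0])) and boards in which some row is shorter than row 0 (the outer
-- loop reads chessboard[i][j] for every j < len(chessboard[0])).
def Pre_flipChess (chessboard : List String) : Prop :=
  chessboard ≠ [] ∧ ∀ s ∈ chessboard, (chessboard.headD "").toList.length ≤ s.toList.length
instance (chessboard : List String) : Decidable (Pre_flipChess chessboard) := by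
  unfold Pre_flipChess; infer_instance

def pvWitness_flipChess : List String := [".OX", "X.O", "OO."]

def Spec_flipChess (chessboard : List String) (out : Int) : Prop := out = flipChess_alt chessboard
instance (chessboard : List String) (out : Int) : Decidable (Spec_flipChess chessboard out) := by
  unfold Spec_flipChess; infer_instance

-- ===== CLAIM (what is proved, stated in full; the proofs are below) =====
def Claim_equal_flipChess : Prop := ∀ (chessboard : List String), Dom_flipChess chessboard → Pre_flipChess chessboard → Spec_flipChess chessboard (flipChess chessboard)

-- ===== LEMMAS AND PROOFS =====

-- generic list-set/getD helpers
theorem pvGetD_set_self {α : Type} (l : List α) (i : Nat) (a d : α) (h : i < l.length) :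
    (l.set i a).getD i d = a := by
  simp [List.getD_eq_getElem?_getD, h]

theorem pvGetD_set_ne {α : Type} (l : List α) (i j : Nat) (a : α) (d : α) (h : i ≠ j) :
    (l.set i a).getD j d = l.getD j d := by
  simp [List.getD_eq_getElem?_getD, List.getElem?_set_ne h]

theorem pvSet_getD_self {α : Type} (l : List α) (i : Nat) (d : α) (h : i < l.length) :
    l.set i (l.getD i d) = l := by
  apply List.ext_getElem
  · simp
  · intro k hk _
    rw [List.getElem_set]
    split
    · subst i; simp [List.getD_eq_getElem?_getD, List.getElem?_eq_getElem h]
    · rfl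

theorem pvGetD_map {α β : Type} (l : List α) (f : α → β) (j : Nat) (d : α) (db : β)
    (hd : f d = db) : (l.map f).getD j db = f (l.getD j d) := by
  rw [← hd]; exact List.getD_map l d f

-- char classes: '.', 'X', everything else behaves as a white piece
def normC (c : Char) : Char := if c = '.' then '.' else if c = 'X' then 'X' else 'O'

def normBd (b : List (List Char)) : List (List Char) := b.map (List.map normC)

theorem normC_dot (a : Char) : normC a = '.' ↔ a = '.' := by
  unfold normC; split_ifs with h1 h2
  · exact iff_of_true rfl h1
  · exact iff_of_false (by decide) h1
  · exact iff_of_false (by decide) h1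

theorem normC_X (a : Char) : normC a = 'X' ↔ a = 'X' := by
  unfold normC; split_ifs with h1 h2
  · exact iff_of_false (by decide) (fun hX => by rw [h1] at hX; exact absurd hX (by decide))
  · exact iff_of_true rfl h2
  · exact iff_of_false (by decide) h2

theorem pvCheck_iff (m n x y : Int) :
    pvCheck m n x y = true ↔ 0 ≤ x ∧ x < m ∧ 0 ≤ y ∧ y < n := by
  simp [pvCheck, and_assoc]

theorem pvGet_norm (b : List (List Char)) (x y : Int) :
    pvGet (normBd b) x y = normC (pvGet b x y) := by
  unfold pvGet normBd
  rw [pvGetD_map b (List.map normC) x.toNat [] [] rfl,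
    pvGetD_map (b.getD x.toNat []) normC y.toNat '.' '.' (by decide)]

theorem pvSetC_norm (b : List (List Char)) (x y : Int) (c : Char) :
    normBd (pvSetC b x y c) = pvSetC (normBd b) x y (normC c) := by
  unfold pvSetC normBd
  rw [List.map_set, List.map_set, pvGetD_map b (List.map normC) x.toNat [] [] rfl]

theorem pvGet_pvSetC_ne (b : List (List Char)) (px py x y : Int) (c : Char)
    (hx : 0 ≤ x) (hy : 0 ≤ y) (hpx : 0 ≤ px) (hpy : 0 ≤ py)
    (hne : x ≠ px ∨ y ≠ py) : pvGet (pvSetC b px py c) x y = pvGet b x y := by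
  unfold pvGet pvSetC
  by_cases hxp : x.toNat = px.toNat
  · have hyne : y ≠ py := by
      rcases hne with h | h
      · exact absurd (by omega : x = px) h
      · exact h
    by_cases hlt : px.toNat < b.length
    · rw [hxp, pvGetD_set_self _ _ _ _ hlt]
      have : py.toNat ≠ y.toNat := by omega
      rw [pvGetD_set_ne _ _ _ _ _ this]
    · rw [List.set_eq_of_length_le (by omega)]
  · rw [pvGetD_set_ne _ _ _ _ _ (fun h => hxp h.symm)]

theorem pvSetC_pvSetC (b : List (List Char)) (x y : Int) (c c' : Char) :
    pvSetC (pvSetC b x y c) x y c' = pvSetC b x y c' := by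
  unfold pvSetC
  by_cases h : x.toNat < b.length
  · rw [pvGetD_set_self _ _ _ _ h, List.set_set, List.set_set]
  · have h' : b.length ≤ x.toNat := by omega
    have e1 : ∀ r : List Char, b.set x.toNat r = b := fun r => List.set_eq_of_length_le h'
    simp [e1]

theorem pvSetC_get_self (b : List (List Char)) (x y : Int)
    (hx : x.toNat < b.length) (hy : y.toNat < (b.getD x.toNat []).length) :
    pvSetC b x y (pvGet b x y) = b := by
  unfold pvSetC pvGet
  rw [pvSet_getD_self _ _ _ hy, pvSet_getD_self _ _ _ hx]

-- row-length profiles and board shape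
def ShapeOK (m n : Int) (b : List (List Char)) : Prop :=
  (b.length : Int) = m ∧ ∀ r ∈ b, n ≤ (r.length : Int)

theorem ShapeOK_of_lens_eq (m n : Int) (a b : List (List Char))
    (h : a.map List.length = b.map List.length) (ha : ShapeOK m n a) : ShapeOK m n b := by
  obtain ⟨h1, h2⟩ := ha
  constructor
  · have := congrArg List.length h; simp at this; omega
  · intro r hr
    have : r.length ∈ b.map List.length := List.mem_map_of_mem hr
    rw [← h] at this
    obtain ⟨r', hr', he⟩ := List.mem_map.mp this
    rw [← he]; exact h2 r' hr'

theorem lens_pvSetC (b : List (List Char)) (x y : Int) (c : Char) :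
    (pvSetC b x y c).map List.length = b.map List.length := by
  unfold pvSetC
  rw [List.map_set]
  by_cases h : x.toNat < b.length
  · have h2 : ((b.getD x.toNat []).set y.toNat c).length =
        (b.map List.length).getD x.toNat 0 := by
      rw [pvGetD_map b List.length x.toNat [] 0 rfl]
      simp
    rw [h2]
    exact pvSet_getD_self _ _ _ (by simpa using h)
  · exact List.set_eq_of_length_le (by simpa using (by omega : b.length ≤ x.toNat))

theorem lens_flipAllB (ch : List (Int × Int)) :
    ∀ b, (flipAllB ch b).map List.length = b.map List.length := by
  induction ch with
  | nil => intro b; simp [flipAllB]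
  | cons p t ih =>
    intro b
    simp only [flipAllB, List.foldl_cons] at *
    rw [ih, lens_pvSetC]

-- reference walk: the chain a scan from (x,y) in direction (di,dj) flips (proof-only)
def wRef (m n : Int) : Nat → Int → Int → Int → Int → List (List Char) →
    Option (List (Int × Int))
  | 0, _, _, _, _, _ => none
  | f+1, x, y, di, dj, b =>
    if ¬ (pvCheck m n x y = true) ∨ pvGet b x y = '.' then none
    else if pvGet b x y = 'X' then some []
    else (wRef m n f (x+di) (y+dj) di dj b).map (fun ch => (x,y) :: ch)

-- frame lemma: a write off the forward ray does not change the walk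
theorem wRef_frame (m n : Int) : ∀ (f : Nat) (x y di dj px py : Int) (c : Char)
    (b : List (List Char)), ¬(di = 0 ∧ dj = 0) → 0 ≤ px → 0 ≤ py →
    (∀ k : Int, 0 ≤ k → ¬(x + k*di = px ∧ y + k*dj = py)) →
    wRef m n f x y di dj (pvSetC b px py c) = wRef m n f x y di dj b := by
  intro f
  induction f with
  | zero => intro _ _ _ _ _ _ _ _ _ _ _ _; rfl
  | succ f ih =>
    intro x y di dj px py c b hd hpx hpy hoff
    by_cases hc : pvCheck m n x y = true
    · have hx : 0 ≤ x := ((pvCheck_iff m n x y).mp hc).1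
      have hy : 0 ≤ y := ((pvCheck_iff m n x y).mp hc).2.2.1
      have hne : x ≠ px ∨ y ≠ py := by
        have := hoff 0 le_rfl; simp at this
        by_cases h : x = px
        · right; exact this h
        · left; exact h
      have hg : pvGet (pvSetC b px py c) x y = pvGet b x y :=
        pvGet_pvSetC_ne b px py x y c hx hy hpx hpy hne
      have hoff' : ∀ k : Int, 0 ≤ k → ¬((x+di) + k*di = px ∧ (y+dj) + k*dj = py) := by
        intro k hk
        have := hoff (k+1) (by omega)
        have e1 : x + (k+1)*di = x + di + k*di := by ring
        have e2 : y + (k+1)*dj = y + dj + k*dj := by ring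
        rw [e1, e2] at this
        exact this
      simp only [wRef, hg, ih (x+di) (y+dj) di dj px py c b hd hpx hpy hoff']
    · simp only [wRef, hc]
      simp

-- A's search versus the reference walk
theorem searchA_spec (m n : Int) : ∀ (f : Nat) (b b2 : List (List Char)) (x y di dj : Int),
    ¬(di = 0 ∧ dj = 0) → normBd b = normBd b2 → ShapeOK m n b2 →
    (searchA m n f x y di dj b).2.1 = (wRef m n f x y di dj b2).getD [] ∧
    (searchA m n f x y di dj b).1 = (wRef m n f x y di dj b2).isSome ∧
    normBd (searchA m n f x y di dj b).2.2 =
      normBd (flipAllB ((wRef m n f x y di dj b2).getD []) b2) := by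
  intro f
  induction f with
  | zero =>
    intro b b2 x y di dj _ hn _
    exact ⟨rfl, rfl, hn⟩
  | succ f ih =>
    intro b b2 x y di dj hd hn hsh
    have hg : normC (pvGet b x y) = normC (pvGet b2 x y) := by
      rw [← pvGet_norm, ← pvGet_norm, hn]
    have hdot : (pvGet b x y = '.') = (pvGet b2 x y = '.') := by
      apply propext
      rw [← normC_dot (pvGet b x y), ← normC_dot (pvGet b2 x y), hg]
    have hX : (pvGet b x y = 'X') = (pvGet b2 x y = 'X') := by
      apply propext
      rw [← normC_X (pvGet b x y), ← normC_X (pvGet b2 x y), hg]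
    by_cases h1 : ¬ (pvCheck m n x y = true) ∨ pvGet b x y = '.'
    · have h1' : ¬ (pvCheck m n x y = true) ∨ pvGet b2 x y = '.' := by
        rw [← hdot]; exact h1
      simp only [searchA, wRef, if_pos h1, if_pos h1']
      exact ⟨rfl, rfl, hn⟩
    · have h1' : ¬ (¬ (pvCheck m n x y = true) ∨ pvGet b2 x y = '.') := by
        rw [← hdot]; exact h1
      have hchk : pvCheck m n x y = true := by
        by_contra hc; exact h1 (Or.inl hc)
      obtain ⟨hx, hxm, hy, hyn⟩ := (pvCheck_iff m n x y).mp hchk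
      by_cases h2 : pvGet b x y = 'X'
      · have h2' : pvGet b2 x y = 'X' := by rw [← hX]; exact h2
        simp only [searchA, wRef, if_neg h1, if_neg h1', if_pos h2, if_pos h2']
        exact ⟨rfl, rfl, hn⟩
      · have h2' : ¬ pvGet b2 x y = 'X' := by rw [← hX]; exact h2
        -- white cell
        have hwhite : normC (pvGet b2 x y) = 'O' := by
          rw [← hg]; unfold normC
          rw [if_neg (by by_contra hc; exact h1 (Or.inr hc)), if_neg h2]
        have hn1 : normBd (pvSetC b x y 'X') = normBd (pvSetC b2 x y 'X') := by
          rw [pvSetC_norm, pvSetC_norm, hn]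
        have hsh1 : ShapeOK m n (pvSetC b2 x y 'X') :=
          ShapeOK_of_lens_eq m n b2 _ (lens_pvSetC b2 x y 'X').symm hsh
        have hframe : wRef m n f (x+di) (y+dj) di dj (pvSetC b2 x y 'X') =
            wRef m n f (x+di) (y+dj) di dj b2 := by
          apply wRef_frame m n f (x+di) (y+dj) di dj x y 'X' b2 hd hx hy
          intro k hk ⟨e1, e2⟩
          have h3 : (k+1) * di = 0 := by linear_combination e1
          have h4 : (k+1) * dj = 0 := by linear_combination e2
          rcases mul_eq_zero.mp h3 with h5 | h5
          · omega
          · rcases mul_eq_zero.mp h4 with h6 | h6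
            · omega
            · exact hd ⟨h5, h6⟩
        obtain ⟨iht, ihf, ihb⟩ :=
          ih (pvSetC b x y 'X') (pvSetC b2 x y 'X') (x+di) (y+dj) di dj hd hn1 hsh1
        rw [hframe] at iht ihf ihb
        simp only [searchA, wRef, if_neg h1, if_neg h1', if_neg h2, if_neg h2']
        cases hw : wRef m n f (x+di) (y+dj) di dj b2 with
        | none =>
          rw [hw] at iht ihf ihb
          rw [ihf]
          simp only [Option.isSome_none, Option.map_none, Option.getD_none] at iht ihb ⊢
          rw [if_pos trivial]
          refine ⟨rfl, rfl, ?_⟩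
          -- board: the backtracking write restores the class picture
          obtain ⟨hm2, hrows2⟩ := hsh
          have hb21 : normBd (searchA m n f (x+di) (y+dj) di dj (pvSetC b x y 'X')).2.2 =
              pvSetC (normBd b2) x y 'X' := by
            rw [ihb]
            rw [show flipAllB [] (pvSetC b2 x y 'X') = pvSetC b2 x y 'X' from rfl]
            rw [pvSetC_norm, show normC 'X' = 'X' by decide]
          rw [pvSetC_norm, hb21, pvSetC_pvSetC]
          rw [show flipAllB [] b2 = b2 from rfl]
          have hxr : x.toNat < (normBd b2).length := by
            have : (normBd b2).length = b2.length := by simp [normBd]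
            omega
          have hyr : y.toNat < ((normBd b2).getD x.toNat []).length := by
            have hrow : (normBd b2).getD x.toNat [] = List.map normC (b2.getD x.toNat []) :=
              pvGetD_map b2 (List.map normC) x.toNat [] [] rfl
            rw [hrow, List.length_map]
            have hlt : x.toNat < b2.length := by omega
            have hmem : b2.getD x.toNat [] ∈ b2 := by
              rw [List.getD_eq_getElem?_getD, List.getElem?_eq_getElem hlt]
              exact List.getElem_mem hlt
            have := hrows2 _ hmem
            omega
          have hget : pvGet (normBd b2) x y = normC 'O' := by
            rw [pvGet_norm, hwhite]; rfl
          calc pvSetC (normBd b2) x y (normC 'O')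
              = pvSetC (normBd b2) x y (pvGet (normBd b2) x y) := by rw [hget]
            _ = normBd b2 := pvSetC_get_self (normBd b2) x y hxr hyr
        | some ch =>
          rw [hw] at iht ihf ihb
          rw [ihf]
          simp only [Option.isSome_some, Option.map_some]
          rw [if_neg (by decide : ¬ (true = false))]
          refine ⟨?_, rfl, ?_⟩
          · simp only [Option.getD_some] at iht ⊢
            rw [iht]
          · simp only [Option.getD_some] at ihb ⊢
            rw [ihb]
            rfl

-- B's scan versus the reference walk
theorem scanGoB_spec (m n : Int) : ∀ (f : Nat) (x y di dj : Int) (b : List (List Char))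
    (acc : List (Int × Int)),
    scanGoB m n f x y di dj b acc =
      (match wRef m n f x y di dj b with
       | none => []
       | some ch => acc.reverse ++ ch) := by
  intro f
  induction f with
  | zero => intro x y di dj b acc; rfl
  | succ f ih =>
    intro x y di dj b acc
    simp only [scanGoB, wRef]
    split
    · rfl
    · split
      · simp
      · rw [ih (x+di) (y+dj) di dj b ((x,y) :: acc)]
        cases wRef m n f (x+di) (y+dj) di dj b with
        | none => rfl
        | some ch => simp

-- B-side denotation of one cascade (proof-only; mirrors frame processing)
def dirsB (m n : Int) (K : Nat)
    (dfs : (Int × Int) → List (List Char) → Int × List (List Char)) (x y : Int) :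
    List (Int × Int) → List (List Char) → Int × List (List Char)
  | [], b => (0, b)
  | (di, dj) :: rest, b =>
    let ch := scanGoB m n K (x+di) (y+dj) di dj b []
    let b1 := flipAllB ch b
    let p := popA dfs ch.length ch b1
    let q := dirsB m n K dfs x y rest p.2
    (p.1 + q.1, q.2)

def dfsB (m n : Int) (K : Nat) : Nat → Int → Int → List (List Char) → Int × List (List Char)
  | 0, _, _, b => (0, b)
  | ψ+1, x, y, b => dirsB m n K (fun p b' => dfsB m n K ψ p.1 p.2 b') x y pvDirs b

theorem pvDirs_nonzero : ∀ d ∈ pvDirs, ¬(d.1 = 0 ∧ d.2 = 0) := by decide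

-- A's dfs and B's denotation agree on counts, boards stay class-equal, and the
-- row-length profile is preserved
theorem AB_equiv (m n : Int) (K : Nat) : ∀ (ψ : Nat) (x y : Int) (b b2 : List (List Char)),
    normBd b = normBd b2 → ShapeOK m n b2 →
    (dfsA m n K ψ x y b).1 = (dfsB m n K ψ x y b2).1 ∧
    normBd (dfsA m n K ψ x y b).2 = normBd (dfsB m n K ψ x y b2).2 ∧
    (dfsB m n K ψ x y b2).2.map List.length = b2.map List.length := by
  intro ψ
  induction ψ with
  | zero =>
    intro x y b b2 hn _
    exact ⟨rfl, hn, rfl⟩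
  | succ ψ IH =>
    intro x y b b2 hn hsh
    -- the inner while-loop
    have hpop : ∀ (fl : Nat) (tmp : List (Int × Int)), tmp.length = fl →
        ∀ (b b2 : List (List Char)), normBd b = normBd b2 → ShapeOK m n b2 →
        (popA (fun p b' => dfsA m n K ψ p.1 p.2 b') fl tmp b).1 =
          (popA (fun p b' => dfsB m n K ψ p.1 p.2 b') fl tmp b2).1 ∧
        normBd (popA (fun p b' => dfsA m n K ψ p.1 p.2 b') fl tmp b).2 =
          normBd (popA (fun p b' => dfsB m n K ψ p.1 p.2 b') fl tmp b2).2 ∧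
        (popA (fun p b' => dfsB m n K ψ p.1 p.2 b') fl tmp b2).2.map List.length =
          b2.map List.length := by
      intro fl
      induction fl with
      | zero =>
        intro tmp hlen b b2 hn hsh
        have htmp : tmp = [] := List.eq_nil_of_length_eq_zero hlen
        subst htmp
        simp only [popA]
        exact ⟨trivial, hn, trivial⟩
      | succ fl ihfl =>
        intro tmp hlen b b2 hn hsh
        match tmp with
        | t :: ts =>
          simp only [popA]
          obtain ⟨c1, c2, c3⟩ := IH ((t :: ts).getLast (by simp)).1
            ((t :: ts).getLast (by simp)).2 b b2 hn hsh
          have hsh' : ShapeOK m n (dfsB m n K ψ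
              ((t :: ts).getLast (by simp)).1 ((t :: ts).getLast (by simp)).2 b2).2 :=
            ShapeOK_of_lens_eq m n b2 _ c3.symm hsh
          have hdl : ((t :: ts).dropLast).length = fl := by
            simp only [List.length_dropLast, List.length_cons]
            simp only [List.length_cons] at hlen
            omega
          obtain ⟨d1, d2, d3⟩ := ihfl ((t :: ts).dropLast) hdl _ _ c2 hsh'
          exact ⟨by rw [c1, d1], d2, d3.trans c3⟩
    -- the direction loop
    have hdirs : ∀ (ds : List (Int × Int)), (∀ d ∈ ds, ¬(d.1 = 0 ∧ d.2 = 0)) →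
        ∀ (b b2 : List (List Char)), normBd b = normBd b2 → ShapeOK m n b2 →
        (dirsA m n K (fun p b' => dfsA m n K ψ p.1 p.2 b') x y ds b).1 =
          (dirsB m n K (fun p b' => dfsB m n K ψ p.1 p.2 b') x y ds b2).1 ∧
        normBd (dirsA m n K (fun p b' => dfsA m n K ψ p.1 p.2 b') x y ds b).2 =
          normBd (dirsB m n K (fun p b' => dfsB m n K ψ p.1 p.2 b') x y ds b2).2 ∧
        (dirsB m n K (fun p b' => dfsB m n K ψ p.1 p.2 b') x y ds b2).2.map List.length =
          b2.map List.length := by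
      intro ds
      induction ds with
      | nil =>
        intro _ b b2 hn _
        simp only [dirsA, dirsB]
        exact ⟨trivial, hn, trivial⟩
      | cons d rest ihds =>
        intro hds b b2 hn hsh
        obtain ⟨di, dj⟩ := d
        have hd0 : ¬(di = 0 ∧ dj = 0) := hds (di, dj) List.mem_cons_self
        obtain ⟨iht, ihf, ihb⟩ := searchA_spec m n K b b2 (x+di) (y+dj) di dj hd0 hn hsh
        have hch : scanGoB m n K (x+di) (y+dj) di dj b2 [] =
            (wRef m n K (x+di) (y+dj) di dj b2).getD [] := by
          rw [scanGoB_spec m n K (x+di) (y+dj) di dj b2 []]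
          cases wRef m n K (x+di) (y+dj) di dj b2 <;> simp
        set ch := (wRef m n K (x+di) (y+dj) di dj b2).getD []
        have hshF : ShapeOK m n (flipAllB ch b2) :=
          ShapeOK_of_lens_eq m n b2 _ (lens_flipAllB ch b2).symm hsh
        obtain ⟨p1, p2, p3⟩ := hpop ch.length ch rfl
          (searchA m n K (x+di) (y+dj) di dj b).2.2 (flipAllB ch b2) ihb hshF
        have hshP : ShapeOK m n
            (popA (fun p b' => dfsB m n K ψ p.1 p.2 b') ch.length ch (flipAllB ch b2)).2 :=
          ShapeOK_of_lens_eq m n (flipAllB ch b2) _ p3.symm hshF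
        obtain ⟨q1, q2, q3⟩ := ihds (fun d hd => hds d (List.mem_cons_of_mem _ hd))
          (popA (fun p b' => dfsA m n K ψ p.1 p.2 b') ch.length ch
            (searchA m n K (x+di) (y+dj) di dj b).2.2).2
          (popA (fun p b' => dfsB m n K ψ p.1 p.2 b') ch.length ch (flipAllB ch b2)).2 p2 hshP
        simp only [dirsA, dirsB, hch, iht]
        refine ⟨by rw [p1, q1], q2, ?_⟩
        exact q3.trans (p3.trans (lens_flipAllB ch b2))
    simp only [dfsA, dfsB]
    exact hdirs pvDirs pvDirs_nonzero b b2 hn hsh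

-- chain-length bound, for the machine's gas accounting
theorem scanGoB_length_le (m n : Int) : ∀ (f : Nat) (cx cy di dj : Int) b acc,
    (scanGoB m n f cx cy di dj b acc).length ≤ f + acc.length := by
  intro f
  induction f with
  | zero => intro cx cy di dj b acc; simp [scanGoB]
  | succ f ih =>
    intro cx cy di dj b acc
    simp only [scanGoB]
    split
    · simp
    · split
      · simp only [List.length_reverse]; omega
      · have := ih (cx+di) (cy+dj) di dj b ((cx,cy) :: acc)
        simp only [List.length_cons] at this ⊢; omega

-- step weight of a frame
def pvMu (K : Nat) (fr : Nat × (Int × Int) × List (Int × Int) × List (Int × Int)) : Nat :=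
  match fr with
  | (0, _, _, _) => 1
  | (f+1, _, ds, tmp) => 1 + ds.length * (1 + K * (1 + pvW K f)) + tmp.length * (1 + pvW K f)

theorem pvMu_fresh (K f : Nat) (p : Int × Int) : pvMu K (f, p, pvDirs, []) = pvW K f := by
  cases f <;> simp [pvMu, pvW, pvDirs]

-- denotation of a frame stack
def frameDen (m n : Int) (K : Nat)
    (fr : Nat × (Int × Int) × List (Int × Int) × List (Int × Int))
    (b : List (List Char)) : Int × List (List Char) :=
  match fr with
  | (0, _, _, _) => (0, b)
  | (f+1, pos, ds, tmp) =>
    let p := popA (fun pr b' => dfsB m n K f pr.1 pr.2 b') tmp.length tmp b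
    let q := dirsB m n K (fun pr b' => dfsB m n K f pr.1 pr.2 b') pos.1 pos.2 ds p.2
    (p.1 + q.1, q.2)

def framesDen (m n : Int) (K : Nat) :
    List (Nat × (Int × Int) × List (Int × Int) × List (Int × Int)) →
    List (List Char) → Int × List (List Char)
  | [], b => (0, b)
  | fr :: rest, b =>
    let p := frameDen m n K fr b
    let q := framesDen m n K rest p.2
    (p.1 + q.1, q.2)

theorem frameDen_fresh (m n : Int) (K f : Nat) (p : Int × Int) (b : List (List Char)) :
    frameDen m n K (f, p, pvDirs, []) b = dfsB m n K f p.1 p.2 b := by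
  cases f with
  | zero => rfl
  | succ f' =>
    simp only [frameDen, dfsB, popA, List.length_nil]
    exact Prod.ext (by push_cast; ring) rfl

-- with enough gas the machine computes the denotation of its frame stack
theorem machineB_den (m n : Int) (K : Nat) : ∀ (gas : Nat) (s : Int × List (List Char))
    (frames : List (Nat × (Int × Int) × List (Int × Int) × List (Int × Int))),
    (frames.map (pvMu K)).sum < gas →
    machineB m n K gas s frames =
      (s.1 + (framesDen m n K frames s.2).1, (framesDen m n K frames s.2).2) := by
  intro gas
  induction gas with
  | zero => intro s frames h; exact absurd h (by omega)
  | succ gas ih =>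
    intro s frames hlt
    match frames with
    | [] =>
      simp only [machineB, framesDen]
      exact Prod.ext (by push_cast; ring) rfl
    | (0, pos0, ds0, tmp0) :: rest =>
      rw [show machineB m n K (gas+1) s ((0, pos0, ds0, tmp0) :: rest) =
        machineB m n K gas s rest from rfl]
      rw [ih s rest (by simp only [List.map_cons, List.sum_cons, pvMu] at hlt ⊢; omega)]
      simp only [framesDen, frameDen]
      exact Prod.ext (by push_cast; ring) rfl
    | (f+1, pos, ds, t :: ts) :: rest =>
      rw [show machineB m n K (gas+1) s ((f+1, pos, ds, t :: ts) :: rest) =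
        machineB m n K gas (s.1 + 1, s.2)
          (((f, (t :: ts).getLast (by simp), pvDirs, []) ::
            (f+1, pos, ds, (t :: ts).dropLast) :: rest)) from rfl]
      have hdec : ((((f, (t :: ts).getLast (by simp), pvDirs, []) :
            Nat × (Int × Int) × List (Int × Int) × List (Int × Int)) ::
            (f+1, pos, ds, (t :: ts).dropLast) :: rest).map (pvMu K)).sum < gas := by
        simp only [List.map_cons, List.sum_cons] at hlt ⊢
        rw [pvMu_fresh]
        simp only [pvMu, List.length_dropLast, List.length_cons, Nat.add_sub_cancel] at hlt ⊢
        have e : (ts.length + 1) * (1 + pvW K f) =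
            ts.length * (1 + pvW K f) + (1 + pvW K f) := by rw [Nat.add_mul, Nat.one_mul]
        rw [e] at hlt
        linarith
      rw [ih _ _ hdec]
      simp only [framesDen]
      rw [frameDen_fresh]
      simp only [frameDen, popA, List.length_cons, List.length_dropLast, Nat.add_sub_cancel]
      exact Prod.ext (by push_cast; ring) rfl
    | (f+1, pos, [], []) :: rest =>
      rw [show machineB m n K (gas+1) s ((f+1, pos, [], []) :: rest) =
        machineB m n K gas s rest from rfl]
      rw [ih s rest (by simp only [List.map_cons, List.sum_cons, pvMu] at hlt ⊢; simp at hlt ⊢; omega)]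
      simp only [framesDen, frameDen, popA, dirsB]
      exact Prod.ext (by push_cast; ring) rfl
    | (f+1, pos, (di,dj) :: ds', []) :: rest =>
      rw [show machineB m n K (gas+1) s ((f+1, pos, (di,dj) :: ds', []) :: rest) =
        machineB m n K gas (s.1, flipAllB (scanGoB m n K (pos.1 + di) (pos.2 + dj) di dj s.2 []) s.2)
          ((f+1, pos, ds', scanGoB m n K (pos.1 + di) (pos.2 + dj) di dj s.2 []) :: rest) from rfl]
      have hc : (scanGoB m n K (pos.1 + di) (pos.2 + dj) di dj s.2 []).length ≤ K := by
        simpa using scanGoB_length_le m n K (pos.1 + di) (pos.2 + dj) di dj s.2 []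
      have hdec : ((((f+1, pos, ds', scanGoB m n K (pos.1 + di) (pos.2 + dj) di dj s.2 []) :
            Nat × (Int × Int) × List (Int × Int) × List (Int × Int)) :: rest).map (pvMu K)).sum < gas := by
        simp only [List.map_cons, List.sum_cons, pvMu, List.length_cons, List.length_nil] at hlt ⊢
        have h2 : (scanGoB m n K (pos.1 + di) (pos.2 + dj) di dj s.2 []).length * (1 + pvW K f)
            ≤ K * (1 + pvW K f) := Nat.mul_le_mul_right _ hc
        have e : (ds'.length + 1) * (1 + K * (1 + pvW K f)) =
            ds'.length * (1 + K * (1 + pvW K f)) + (1 + K * (1 + pvW K f)) := by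
          rw [Nat.add_mul, Nat.one_mul]
        rw [e] at hlt
        linarith
      rw [ih _ _ hdec]
      simp only [framesDen, frameDen, popA, dirsB]
      exact Prod.ext (by push_cast; ring) rfl

-- one placement: A's recursive cascade equals B's machine run
theorem cellAB (m n : Int) (K DF' : Nat) (rows : List (List Char))
    (hsh : ShapeOK m n rows) (i j : Int) :
    (machineB m n K (pvW K (DF'+1) + 1) (0, rows) [(DF'+1, (i,j), pvDirs, [])]).1 =
      (dfsA m n K (DF'+1) i j rows).1 := by
  rw [machineB_den m n K (pvW K (DF'+1) + 1) (0, rows) [(DF'+1, (i,j), pvDirs, [])]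
    (by simp [pvMu_fresh])]
  simp only [framesDen, frameDen, popA, dfsA]
  obtain ⟨e1, e2, e3⟩ := AB_equiv m n K (DF'+1) i j rows rows rfl hsh
  simp only [dfsA, dfsB] at e1
  rw [e1]
  ring

-- the inner (column) loop
theorem innerAB (m n : Int) (K DF' : Nat) (rows : List (List Char))
    (hsh : ShapeOK m n rows) (i : Int) :
    ∀ (lj : List Int) (a : Int),
    lj.foldl (fun s' j => if pvGet s'.2 i j = '.' then
        (max s'.1 (dfsA m n K (DF'+1) i j s'.2).1, rows) else s') (a, rows) =
      (lj.foldl (fun ans' j => if pvGet rows i j = '.' then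
        max ans' (machineB m n K (pvW K (DF'+1) + 1) (0, rows) [(DF'+1, (i,j), pvDirs, [])]).1
        else ans') a, rows) := by
  intro lj
  induction lj with
  | nil => intro a; rfl
  | cons j tl ih =>
    intro a
    simp only [List.foldl_cons]
    by_cases hcell : pvGet rows i j = '.'
    · rw [if_pos hcell, if_pos hcell, cellAB m n K DF' rows hsh i j, ih]
    · rw [if_neg hcell, if_neg hcell, ih]

-- the outer (row) loop
theorem outerAB (m n : Int) (K DF' : Nat) (rows : List (List Char))
    (hsh : ShapeOK m n rows) (lj : List Int) :
    ∀ (li : List Int) (a : Int),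
    (li.foldl (fun s i => lj.foldl (fun s' j => if pvGet s'.2 i j = '.' then
        (max s'.1 (dfsA m n K (DF'+1) i j s'.2).1, rows) else s') s) (a, rows)).1 =
      li.foldl (fun ans i => lj.foldl (fun ans' j => if pvGet rows i j = '.' then
        max ans' (machineB m n K (pvW K (DF'+1) + 1) (0, rows) [(DF'+1, (i,j), pvDirs, [])]).1
        else ans') ans) a := by
  intro li
  induction li with
  | nil => intro a; rfl
  | cons i tl ih =>
    intro a
    simp only [List.foldl_cons]
    rw [innerAB m n K DF' rows hsh i lj a, ih]

-- ===== VERDICT (by name: the statement is the Claim_ definition above) =====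
theorem flipChess_spec : Claim_equal_flipChess := by
  unfold Claim_equal_flipChess Spec_flipChess
  intro cb _hdom hpre
  obtain ⟨hne, hrows⟩ := hpre
  simp only [flipChess, flipChess_alt]
  have hhead : (cb.map (fun s => s.toList)).headD [] = (cb.headD "").toList := by
    cases cb with
    | nil => exact absurd rfl hne
    | cons c t => rfl
  have hsh : ShapeOK ((cb.map (fun s => s.toList)).length : Int)
      (((cb.map (fun s => s.toList)).headD []).length : Int) (cb.map (fun s => s.toList)) := by
    constructor
    · rfl
    · intro r hr
      obtain ⟨str, hstr, hrq⟩ := List.mem_map.mp hr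
      have := hrows str hstr
      rw [hhead]
      subst hrq
      exact_mod_cast this
  exact outerAB _ _ _ ((cb.map (fun s => s.toList)).length *
      ((cb.map (fun s => s.toList)).headD []).length + 1) _ hsh _ _ 0
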